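-- pv_equiv track=rewrite | github.com/MementoRC/ci-framework | framework/tests/workflows/test_python_ci_template.py | _get_detected_changes
-- ===== SOURCE A (Python) =====
-- def _get_detected_changes(changed_files: list[str]) -> dict[str, bool]:
--     """Helper method to simulate change detection logic"""
--     changes = {}
--
--     # Check for Python files
--     python_files = [f for f in changed_files if f.endswith(".py")]
--     if python_files:
--         changes["python"] = True
--
--         # Check for action-specific changes
--         if any("actions" in f for f in python_files):
--             changes["actions"] = True
--
--     # Check for dependency files
--     dependency_files = [
--         f
--         for f in changed_files
--         if f
--         in [
--             "pyproject.toml",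
--             "pixi.toml",
--             "requirements.txt",
--             "Pipfile",
--             "poetry.lock",
--         ]
--     ]
--     if dependency_files:
--         changes["dependencies"] = True
--         changes["force-full"] = True
--
--     # Check for docs-only changes
--     doc_files = [
--         f
--         for f in changed_files
--         if f.endswith((".md", ".rst", ".txt"))
--         or f.startswith("docs/")
--         or f in [".gitignore", "LICENSE"]
--     ]
--     if doc_files and not python_files and not dependency_files:
--         changes["docs-only"] = True
--
--     return changes
-- ===== SOURCE B (Python) =====
-- def _get_detected_changes(changed_files: list[str]) -> dict[str, bool]:
--     """Single fused pass maintaining four flags instead of building three filtered lists."""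
--     has_python = has_actions = has_dep = has_doc = False
--     for f in changed_files:
--         if f.endswith(".py"):
--             has_python = True
--             if "actions" in f:
--                 has_actions = True
--         if f in ("pyproject.toml", "pixi.toml", "requirements.txt", "Pipfile", "poetry.lock"):
--             has_dep = True
--         if f.endswith((".md", ".rst", ".txt")) or f.startswith("docs/") or f in (".gitignore", "LICENSE"):
--             has_doc = True
--     changes = {}
--     if has_python:
--         changes["python"] = True
--         if has_actions:
--             changes["actions"] = True
--     if has_dep:
--         changes["dependencies"] = True
--         changes["force-full"] = True
--     if has_doc and not has_python and not has_dep: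
--         changes["docs-only"] = True
--     return changes
-- ===== Notes on version B (the rewrite author's own statement) =====
-- stated objective: simpler
-- what changed: Replaces A's three separate list comprehensions (materialized filtered lists plus an extra any() scan) with a single fused loop over changed_files maintaining four boolean flags, then assembles the dict from the flags.
import Mathlib
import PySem

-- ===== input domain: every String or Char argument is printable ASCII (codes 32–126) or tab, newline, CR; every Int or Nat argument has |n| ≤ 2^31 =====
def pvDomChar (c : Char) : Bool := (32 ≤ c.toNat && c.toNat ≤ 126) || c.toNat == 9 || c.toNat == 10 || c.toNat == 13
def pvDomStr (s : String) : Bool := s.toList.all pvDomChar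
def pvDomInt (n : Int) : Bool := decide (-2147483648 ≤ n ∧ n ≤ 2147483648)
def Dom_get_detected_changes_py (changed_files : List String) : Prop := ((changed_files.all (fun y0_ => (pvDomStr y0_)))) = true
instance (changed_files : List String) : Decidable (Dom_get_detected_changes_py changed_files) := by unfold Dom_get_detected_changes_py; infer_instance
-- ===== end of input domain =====

-- ===== PORT A =====
-- B replaces A's three list-comprehension passes by one fused loop over four boolean flags.
def get_detected_changes_py (changed_files : List String) : List (String × Bool) :=
  let changes : PySem.Dict String Bool := PySem.Dict.empty
  let python_files := changed_files.filter (fun f => PySem.Str.endswith f ".py")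
  let changes :=
    if python_files ≠ [] then
      let changes := PySem.Dict.insert changes "python" true
      if python_files.any (fun f => PySem.Str.isIn "actions" f) then
        PySem.Dict.insert changes "actions" true
      else changes
    else changes
  let dependency_files := changed_files.filter
    (fun f => ["pyproject.toml", "pixi.toml", "requirements.txt", "Pipfile", "poetry.lock"].contains f)
  let changes :=
    if dependency_files ≠ [] then
      PySem.Dict.insert (PySem.Dict.insert changes "dependencies" true) "force-full" true
    else changes
  let doc_files := changed_files.filter
    (fun f => (PySem.Str.endswith f ".md" || PySem.Str.endswith f ".rst" || PySem.Str.endswith f ".txt")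
      || PySem.Str.startswith f "docs/" || [".gitignore", "LICENSE"].contains f)
  let changes :=
    if doc_files ≠ [] ∧ python_files = [] ∧ dependency_files = [] then
      PySem.Dict.insert changes "docs-only" true
    else changes
  changes.items

-- ===== PORT B =====
def pvAltStep (st : Bool × Bool × Bool × Bool) (f : String) : Bool × Bool × Bool × Bool :=
  (if PySem.Str.endswith f ".py" then true else st.1,
   if PySem.Str.endswith f ".py" then
     (if PySem.Str.isIn "actions" f then true else st.2.1) else st.2.1,
   if ["pyproject.toml", "pixi.toml", "requirements.txt", "Pipfile", "poetry.lock"].contains f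
     then true else st.2.2.1,
   if (PySem.Str.endswith f ".md" || PySem.Str.endswith f ".rst" || PySem.Str.endswith f ".txt")
       || PySem.Str.startswith f "docs/" || [".gitignore", "LICENSE"].contains f
     then true else st.2.2.2)

def get_detected_changes_py_alt (changed_files : List String) : List (String × Bool) :=
  let st := changed_files.foldl pvAltStep (false, false, false, false)
  let has_python := st.1
  let has_actions := st.2.1
  let has_dep := st.2.2.1
  let has_doc := st.2.2.2
  let changes : PySem.Dict String Bool := PySem.Dict.empty
  let changes :=
    if has_python then
      let changes := PySem.Dict.insert changes "python" true
      if has_actions then PySem.Dict.insert changes "actions" true else changes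
    else changes
  let changes :=
    if has_dep then
      PySem.Dict.insert (PySem.Dict.insert changes "dependencies" true) "force-full" true
    else changes
  let changes :=
    if has_doc && !has_python && !has_dep then
      PySem.Dict.insert changes "docs-only" true
    else changes
  changes.items

-- ===== PRECONDITION & SPEC =====
def Spec_get_detected_changes_py (changed_files : List String) (out : List (String × Bool)) : Prop := out = get_detected_changes_py_alt changed_files
instance (changed_files : List String) (out : List (String × Bool)) : Decidable (Spec_get_detected_changes_py changed_files out) := by unfold Spec_get_detected_changes_py; infer_instance

-- ===== CLAIM (what is proved, stated in full; the proofs are below) =====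
def Claim_equal_get_detected_changes_py : Prop := ∀ (changed_files : List String), Dom_get_detected_changes_py changed_files → Spec_get_detected_changes_py changed_files (get_detected_changes_py changed_files)

-- ===== LEMMAS AND PROOFS =====

-- B's fused fold accumulates exactly "any" of the four per-file predicates.
lemma pvAltStep_foldl (xs : List String) (a b c d : Bool) :
    xs.foldl pvAltStep (a, b, c, d) =
      (a || xs.any (fun f => PySem.Str.endswith f ".py"),
       b || xs.any (fun f => PySem.Str.endswith f ".py" && PySem.Str.isIn "actions" f),
       c || xs.any (fun f => ["pyproject.toml", "pixi.toml", "requirements.txt", "Pipfile", "poetry.lock"].contains f),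
       d || xs.any (fun f => (PySem.Str.endswith f ".md" || PySem.Str.endswith f ".rst" || PySem.Str.endswith f ".txt")
              || PySem.Str.startswith f "docs/" || [".gitignore", "LICENSE"].contains f)) := by
  induction xs generalizing a b c d with
  | nil => simp
  | cons x xs ih =>
    simp only [List.foldl_cons, List.any_cons, pvAltStep]
    rw [ih]
    generalize PySem.Str.endswith x ".py" = p1
    generalize PySem.Str.isIn "actions" x = p2
    generalize List.contains ["pyproject.toml", "pixi.toml", "requirements.txt", "Pipfile", "poetry.lock"] x = p3
    generalize ((PySem.Str.endswith x ".md" || PySem.Str.endswith x ".rst" || PySem.Str.endswith x ".txt")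
        || PySem.Str.startswith x "docs/" || [".gitignore", "LICENSE"].contains x) = p4
    cases p1 <;> cases p2 <;> cases p3 <;> cases p4 <;>
      simp [Bool.or_assoc, Bool.or_comm, Bool.or_left_comm]

-- A's "filtered list is (non)empty" tests restated as B's boolean "any" flags.
lemma pvFilter_ne_nil (p : String → Bool) (xs : List String) :
    (xs.filter p ≠ []) = (xs.any p = true) := by
  apply propext; simp [List.filter_eq_nil_iff, List.any_eq_true]

lemma pvFilter_eq_nil (p : String → Bool) (xs : List String) :
    (xs.filter p = []) = (xs.any p = false) := by
  apply propext; simp [List.filter_eq_nil_iff, List.any_eq_false]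

-- ===== VERDICT (by name: the statement is the Claim_ definition above) =====
theorem get_detected_changes_py_spec : Claim_equal_get_detected_changes_py := by
  unfold Claim_equal_get_detected_changes_py Spec_get_detected_changes_py
  intro changed_files _
  simp only [get_detected_changes_py, get_detected_changes_py_alt, pvAltStep_foldl,
    Bool.false_or, List.any_filter, pvFilter_ne_nil, pvFilter_eq_nil]
  generalize changed_files.any (fun f => PySem.Str.endswith f ".py") = P
  generalize changed_files.any
    (fun f => PySem.Str.endswith f ".py" && PySem.Str.isIn "actions" f) = Q
  generalize changed_files.any
    (fun f => ["pyproject.toml", "pixi.toml", "requirements.txt", "Pipfile", "poetry.lock"].contains f) = D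
  generalize changed_files.any
    (fun f => (PySem.Str.endswith f ".md" || PySem.Str.endswith f ".rst" || PySem.Str.endswith f ".txt")
      || PySem.Str.startswith f "docs/" || [".gitignore", "LICENSE"].contains f) = C
  cases P <;> cases Q <;> cases D <;> cases C <;> rfl
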